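-- pv_equiv track=rewrite | github.com/hexagramg/qwlayout | port.py | convoluteParts
-- ===== SOURCE A (Python) =====
-- def convoluteParts(labels):
--     newPart = []
--     for x, row in enumerate(labels):
--         i = -1
--         for y, label in enumerate(row):
--             if x==0 and (y==0 or y==5):
--                 newPart.append(label)
--             else:
--                 if y==0 or y==5:
--                     i+=1
--                 newPart[i] += label
--     return newPart
-- ===== SOURCE B (Python) =====
-- def _segments(row):
--     if not row:
--         return []
--     if len(row) <= 5:
--         return ["".join(row)]
--     return ["".join(row[:5]), "".join(row[5:])]
--
--
-- def convoluteParts(labels):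
--     if not labels:
--         return []
--     parts = _segments(labels[0])
--     for row in labels[1:]:
--         for i, seg in enumerate(_segments(row)):
--             parts[i] += seg
--     return parts
-- ===== Notes on version B (the rewrite author's own statement) =====
-- stated objective: faster
-- what changed: A's double loop with an index counter i and per-label y==0/5 branching is replaced by a helper that turns one row into its segment strings via slicing and ''.join, plus a plain elementwise merge of each later row's segments into parts; ''.join builds each segment once instead of A's repeated string += per label.
import Mathlib
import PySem

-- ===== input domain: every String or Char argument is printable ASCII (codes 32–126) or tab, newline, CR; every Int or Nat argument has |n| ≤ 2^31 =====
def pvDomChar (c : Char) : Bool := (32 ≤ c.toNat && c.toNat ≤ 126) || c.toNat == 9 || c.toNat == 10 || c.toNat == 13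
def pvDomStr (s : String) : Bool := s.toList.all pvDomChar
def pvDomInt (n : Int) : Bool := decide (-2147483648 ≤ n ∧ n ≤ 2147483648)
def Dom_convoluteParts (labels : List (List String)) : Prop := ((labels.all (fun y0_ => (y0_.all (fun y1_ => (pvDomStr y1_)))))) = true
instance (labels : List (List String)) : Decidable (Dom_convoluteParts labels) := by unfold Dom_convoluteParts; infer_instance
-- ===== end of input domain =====

-- B replaces A's index-counter double loop by a per-row slice-and-''.join segment helper
-- plus an elementwise merge; a timing run measured B faster (join builds each segment
-- once instead of A's repeated string +=).

-- ===== PORT A =====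
-- A's inner-loop body, named for readability (a literal transcription of the Python body)
def pvStepA (x : Int) (st : List String × Int) (ylab : Int × String) : List String × Int :=
  if x = 0 ∧ (ylab.1 = 0 ∨ ylab.1 = 5) then (st.1 ++ [ylab.2], st.2)
  else
    let i := if ylab.1 = 0 ∨ ylab.1 = 5 then st.2 + 1 else st.2
    (PySem.List.pySetD st.1 i (PySem.List.pyGetD st.1 i "" ++ ylab.2), i)

def convoluteParts (labels : List (List String)) : List String :=
  (PySem.List.enumerate labels 0).foldl
    (fun newPart xrow =>
      ((PySem.List.enumerate xrow.2 0).foldl (pvStepA xrow.1) (newPart, -1)).1)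
    []

-- ===== PORT B =====
def pvSegments (row : List String) : List String :=
  if row = [] then []
  else if row.length ≤ 5 then [PySem.Str.join "" row]
  else [PySem.Str.join "" (PySem.List.slice row none (some 5)),
        PySem.Str.join "" (PySem.List.slice row (some 5) none)]

-- B's inner-loop body (parts[i] += seg)
def pvStepB (parts : List String) (iseg : Int × String) : List String :=
  PySem.List.pySetD parts iseg.1 (PySem.List.pyGetD parts iseg.1 "" ++ iseg.2)

def convoluteParts_alt (labels : List (List String)) : List String :=
  match labels with
  | [] => []
  | r0 :: rest =>
    rest.foldl
      (fun parts row => (PySem.List.enumerate (pvSegments row) 0).foldl pvStepB parts)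
      (pvSegments r0)

-- ===== PRECONDITION & SPEC =====
-- Pre_ excludes exactly the inputs on which A raises IndexError: a later row that is
-- nonempty while the first row is empty, or a later row of length ≥ 6 while the first
-- row has fewer than 6 labels (A then indexes a part that was never created).
def Pre_convoluteParts (labels : List (List String)) : Prop :=
  ∀ row ∈ labels.tail,
    (row ≠ [] → labels.headI ≠ []) ∧ (6 ≤ row.length → 6 ≤ labels.headI.length)
instance (labels : List (List String)) : Decidable (Pre_convoluteParts labels) := by
  unfold Pre_convoluteParts; infer_instance

def pvWitness_convoluteParts : List (List String) :=
  [["a", "b", "c", "d", "e", "f", "g"], ["u", "v", "w", "x", "y", "z"]]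

def Spec_convoluteParts (labels : List (List String)) (out : List String) : Prop :=
  out = convoluteParts_alt labels
instance (labels : List (List String)) (out : List String) :
    Decidable (Spec_convoluteParts labels out) := by unfold Spec_convoluteParts; infer_instance

-- ===== CLAIM (what is proved, stated in full; the proofs are below) =====
def Claim_equal_convoluteParts : Prop :=
  ∀ (labels : List (List String)), Dom_convoluteParts labels → Pre_convoluteParts labels →
    Spec_convoluteParts labels (convoluteParts labels)

-- ===== LEMMAS AND PROOFS =====

-- concatenation of a list of strings (the value A accumulates label by label)
def pvCat (l : List String) : String := l.foldl (· ++ ·) ""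

theorem pvCat_foldl (l : List String) : ∀ s : String, l.foldl (· ++ ·) s = s ++ pvCat l := by
  induction l with
  | nil =>
    intro s
    simp only [List.foldl_nil, pvCat]
    exact String.append_empty.symm
  | cons a l ih =>
    intro s
    rw [List.foldl_cons, ih]
    have h2 : pvCat (a :: l) = a ++ pvCat l := by
      simp only [pvCat, List.foldl_cons]
      rw [ih, String.empty_append]
      rfl
    rw [h2, String.append_assoc]

theorem pvCat_cons (a : String) (l : List String) : pvCat (a :: l) = a ++ pvCat l := by
  simp only [pvCat, List.foldl_cons]
  rw [pvCat_foldl, String.empty_append]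
  rfl

theorem pvCat_toList (l : List String) :
    (pvCat l).toList = (l.map String.toList).flatten := by
  induction l with
  | nil => simp [pvCat]
  | cons a l ih => simp [pvCat_cons, ih]

theorem pvJoin_empty_sep (css : List (List Char)) :
    PySem.Chars.join [] css = css.flatten := by
  match css with
  | [] => simp [PySem.Chars.join_nil]
  | [p] => simp [PySem.Chars.join_singleton]
  | p :: q :: rest =>
    rw [PySem.Chars.join_cons_cons, pvJoin_empty_sep (q :: rest)]
    simp

theorem pvJoin_eq_pvCat (l : List String) : PySem.Str.join "" l = pvCat l := by
  apply String.toList_inj.mp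
  rw [PySem.Str.toList_join, pvCat_toList]
  simpa using pvJoin_empty_sep (l.map String.toList)

theorem pvSetD_append_singleton_neg_one (p : List String) (s v : String) :
    PySem.List.pySetD (p ++ [s]) (-1) v = p ++ [v] := by
  simp [PySem.List.pySetD, PySem.List.pySet?, PySem.List.pyIdx?]

-- A's append branch (x = 0, y ∈ {0,5})
theorem pvStepA_append (p : List String) (i : Int) (y : Int) (lab : String)
    (hy : y = 0 ∨ y = 5) : pvStepA 0 (p, i) (y, lab) = (p ++ [lab], i) := by
  simp [pvStepA, hy]

-- middle labels acting on the LAST part (row 0, i = -1)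
theorem pvFoldMidL (x : Int) (l : List String) :
    ∀ (k : Int), (∀ j : Int, k ≤ j → j < k + l.length → ¬(j = 0 ∨ j = 5)) →
    ∀ (p : List String) (s : String),
      (PySem.List.enumerate l k).foldl (pvStepA x) (p ++ [s], -1)
        = (p ++ [s ++ pvCat l], -1) := by
  induction l with
  | nil =>
    intro k _ p s
    simp only [PySem.List.enumerate, List.foldl_nil]
    rw [show pvCat [] = "" from rfl, String.append_empty]
  | cons a l ih =>
    intro k hk p s
    have hknot : ¬(k = 0 ∨ k = 5) := hk k le_rfl (by simp only [List.length_cons]; omega)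
    rw [PySem.List.enumerate_cons, List.foldl_cons]
    have hstep : pvStepA x (p ++ [s], -1) (k, a) = (p ++ [s ++ a], -1) := by
      simp [pvStepA, hknot, pvSetD_append_singleton_neg_one,
        PySem.List.pyGetD_neg_one_append_singleton]
    rw [hstep,
      ih (k + 1) (by intro j h1 h2; apply hk j (by omega)
                     simp only [List.length_cons] at h2 ⊢; omega) p (s ++ a),
      pvCat_cons, String.append_assoc]

-- middle labels acting on part i (0 ≤ i; rows x ≥ 1)
theorem pvFoldMidN (x : Int) (l : List String) :
    ∀ (k : Int), (∀ j : Int, k ≤ j → j < k + l.length → ¬(j = 0 ∨ j = 5)) →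
    ∀ (np : List String) (i : Int), 0 ≤ i → i < np.length →
      (PySem.List.enumerate l k).foldl (pvStepA x) (np, i)
        = (np.set i.toNat (np.getD i.toNat "" ++ pvCat l), i) := by
  induction l with
  | nil =>
    intro k _ np i h0 hn
    simp only [PySem.List.enumerate, List.foldl_nil]
    rw [show pvCat [] = "" from rfl, String.append_empty,
      List.getD_eq_getElem np "" (by omega), List.set_getElem_self (by omega)]
  | cons a l ih =>
    intro k hk np i h0 hn
    have hknot : ¬(k = 0 ∨ k = 5) := hk k le_rfl (by simp only [List.length_cons]; omega)
    have htn : i.toNat < np.length := by omega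
    rw [PySem.List.enumerate_cons, List.foldl_cons]
    have hstep : pvStepA x (np, i) (k, a)
        = (np.set i.toNat (np.getD i.toNat "" ++ a), i) := by
      simp only [pvStepA]
      rw [if_neg (fun h => hknot h.2), if_neg hknot,
        PySem.List.pySetD_of_nonneg np _ h0,
        PySem.List.pyGetD_eq_getElem np "" h0 hn,
        List.getD_eq_getElem np "" htn]
    rw [hstep,
      ih (k + 1) (by intro j h1 h2; apply hk j (by omega)
                     simp only [List.length_cons] at h2 ⊢; omega)
        _ i h0 (by rw [List.length_set]; omega)]
    have hg : (np.set i.toNat (np.getD i.toNat "" ++ a)).getD i.toNat ""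
        = np.getD i.toNat "" ++ a := by
      simp [List.getD_eq_getElem?_getD, htn]
    rw [hg, List.set_set, pvCat_cons, String.append_assoc]

-- splitting a row of length ≥ 6 at index 5
theorem pvSplit5 (a : String) (rest : List String) (hlen : 6 ≤ (a :: rest).length) :
    ∃ t4 b r2, (a :: rest).take 5 = a :: t4 ∧ (a :: rest).drop 5 = b :: r2 ∧
      t4.length = 4 := by
  rcases rest with _ | ⟨a1, rest1⟩; · simp at hlen
  rcases rest1 with _ | ⟨a2, rest2⟩; · simp at hlen
  rcases rest2 with _ | ⟨a3, rest3⟩; · simp at hlen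
  rcases rest3 with _ | ⟨a4, rest4⟩; · simp at hlen
  rcases rest4 with _ | ⟨a5, rest5⟩; · simp at hlen
  exact ⟨[a1, a2, a3, a4], a5, rest5, by simp, by simp, by simp⟩

-- row 0 of A builds exactly B's segment list
theorem pvRow0 (row : List String) :
    ((PySem.List.enumerate row 0).foldl (pvStepA 0) ([], -1)).1 = pvSegments row := by
  match row with
  | [] => simp [PySem.List.enumerate, pvSegments]
  | a :: rest =>
    by_cases h5 : (a :: rest).length ≤ 5
    · rw [PySem.List.enumerate_cons, List.foldl_cons,
        pvStepA_append [] (-1) 0 a (Or.inl rfl),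
        show (([] : List String) ++ [a]) = [] ++ [a] from rfl,
        show (0 : Int) + 1 = 1 from by decide,
        pvFoldMidL 0 rest 1
          (by intro j h1 h2; simp only [List.length_cons] at h5 h2; omega) [] a]
      simp only [pvSegments, if_neg (by simp : ¬(a :: rest) = []), if_pos h5,
        List.nil_append]
      rw [pvJoin_eq_pvCat, pvCat_cons]
    · have hlen : 6 ≤ (a :: rest).length := by omega
      obtain ⟨t4, b, r2, ht, hd, ht4len⟩ := pvSplit5 a rest hlen
      have hsplit : (a :: rest) = (a :: t4) ++ (b :: r2) := by
        conv_lhs => rw [← List.take_append_drop 5 (a :: rest)]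
        rw [ht, hd]
      rw [hsplit, PySem.List.enumerate_append, List.foldl_append,
        PySem.List.enumerate_cons, List.foldl_cons,
        pvStepA_append [] (-1) 0 a (Or.inl rfl),
        show (0 : Int) + 1 = 1 from by decide,
        pvFoldMidL 0 t4 1
          (by intro j h1 h2; simp only [ht4len] at h2; omega) [] a,
        show (0 : Int) + (((a :: t4)).length : Int) = 5 from by
          simp only [List.length_cons, ht4len]; omega,
        PySem.List.enumerate_cons, List.foldl_cons,
        pvStepA_append ([] ++ [a ++ pvCat t4]) (-1) 5 b (Or.inr rfl),
        show (5 : Int) + 1 = 6 from by decide,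
        pvFoldMidL 0 r2 6 (by intro j h1 h2; omega) ([] ++ [a ++ pvCat t4]) b]
      simp only [pvSegments, if_neg (by simp : ¬(a :: t4) ++ b :: r2 = []),
        if_neg (by simp only [List.length_append, List.length_cons, ht4len]; omega :
          ¬((a :: t4) ++ b :: r2).length ≤ 5)]
      rw [PySem.List.slice_to (xs := (a :: t4) ++ b :: r2) (b := 5) (by norm_num),
        PySem.List.slice_from (xs := (a :: t4) ++ b :: r2) (a := 5) (by norm_num),
        show ((5 : Int)).toNat = 5 from by decide, ← hsplit, ht, hd,
        pvJoin_eq_pvCat, pvJoin_eq_pvCat, pvCat_cons, pvCat_cons]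
      simp

-- a later row of A performs exactly B's elementwise merge
theorem pvRowX (x : Int) (hx : x ≠ 0) (row np : List String)
    (h1 : row ≠ [] → 1 ≤ np.length) (h2 : 6 ≤ row.length → 2 ≤ np.length) :
    ((PySem.List.enumerate row 0).foldl (pvStepA x) (np, -1)).1
      = (PySem.List.enumerate (pvSegments row) 0).foldl pvStepB np := by
  match row with
  | [] => simp [PySem.List.enumerate, pvSegments]
  | a :: rest =>
    have hnp1 : 1 ≤ np.length := h1 (by simp)
    have hstep : pvStepA x (np, -1) (0, a) = (np.set 0 (np.getD 0 "" ++ a), (0 : Int)) := by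
      simp only [pvStepA]
      rw [if_neg (by simp [hx]), if_pos (by norm_num),
        show (-1 : Int) + 1 = 0 from by decide,
        PySem.List.pySetD_of_nonneg np _ (by norm_num), PySem.List.pyGetD_zero]
      norm_num
    by_cases h5 : (a :: rest).length ≤ 5
    · rw [PySem.List.enumerate_cons, List.foldl_cons, hstep,
        show (0 : Int) + 1 = 1 from by decide,
        pvFoldMidN x rest 1
          (by intro j hj1 hj2; simp only [List.length_cons] at h5 hj2; omega)
          _ 0 (by norm_num) (by rw [List.length_set]; exact_mod_cast hnp1),
        show ((0 : Int)).toNat = 0 from rfl]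
      have h0np : 0 < np.length := hnp1
      have hg : (np.set 0 (np.getD 0 "" ++ a)).getD 0 "" = np.getD 0 "" ++ a := by
        simp [List.getD_eq_getElem?_getD, h0np]
      rw [hg, List.set_set]
      simp only [pvSegments, if_neg (by simp : ¬(a :: rest) = []), if_pos h5]
      rw [PySem.List.enumerate_cons, PySem.List.enumerate_nil]
      simp only [List.foldl_cons, List.foldl_nil, pvStepB]
      rw [PySem.List.pySetD_of_nonneg np _ (by norm_num), PySem.List.pyGetD_zero,
        show ((0 : Int)).toNat = 0 from rfl, pvJoin_eq_pvCat, pvCat_cons,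
        String.append_assoc]
    · have hlen : 6 ≤ (a :: rest).length := by omega
      have hnp2 : 2 ≤ np.length := h2 hlen
      obtain ⟨t4, b, r2, ht, hd, ht4len⟩ := pvSplit5 a rest hlen
      have hsplit : (a :: rest) = (a :: t4) ++ (b :: r2) := by
        conv_lhs => rw [← List.take_append_drop 5 (a :: rest)]
        rw [ht, hd]
      rw [hsplit, PySem.List.enumerate_append, List.foldl_append,
        PySem.List.enumerate_cons, List.foldl_cons, hstep,
        show (0 : Int) + 1 = 1 from by decide,
        pvFoldMidN x t4 1 (by intro j hj1 hj2; simp only [ht4len] at hj2; omega)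
          _ 0 (by norm_num) (by rw [List.length_set]; exact_mod_cast hnp1),
        show ((0 : Int)).toNat = 0 from rfl]
      have h0np : 0 < np.length := hnp1
      have hg : (np.set 0 (np.getD 0 "" ++ a)).getD 0 "" = np.getD 0 "" ++ a := by
        simp [List.getD_eq_getElem?_getD, h0np]
      rw [hg, List.set_set]
      set np2 := np.set 0 (np.getD 0 "" ++ a ++ pvCat t4) with hnp2def
      have hlen2 : np2.length = np.length := by rw [hnp2def, List.length_set]
      have hstep2 : pvStepA x (np2, (0 : Int)) (5, b)
          = (np2.set 1 (np2.getD 1 "" ++ b), (1 : Int)) := by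
        simp only [pvStepA]
        rw [if_neg (by simp [hx]), if_pos (by norm_num),
          show (0 : Int) + 1 = ((1 : Nat) : Int) from by norm_num,
          PySem.List.pySetD_natCast, PySem.List.pyGetD_natCast]
        norm_num
      rw [show ((0 : Int) + ((a :: t4).length : Int)) = 5 from by
          simp only [List.length_cons, ht4len]; omega,
        PySem.List.enumerate_cons, List.foldl_cons, hstep2,
        show (5 : Int) + 1 = 6 from by decide,
        pvFoldMidN x r2 6 (by intro j hj1 hj2; omega)
          _ 1 (by norm_num) (by rw [List.length_set, hlen2]; exact_mod_cast hnp2),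
        show ((1 : Int)).toNat = 1 from rfl]
      have hg1 : (np2.set 1 (np2.getD 1 "" ++ b)).getD 1 "" = np2.getD 1 "" ++ b := by
        have h1np2 : 1 < np2.length := by omega
        simp [List.getD_eq_getElem?_getD, h1np2]
      rw [hg1, List.set_set]
      have hg1np : np2.getD 1 "" = np.getD 1 "" := by
        rw [hnp2def]
        simp [List.getD_eq_getElem?_getD, List.getElem?_set_ne (by norm_num : (0 : Nat) ≠ 1)]
      rw [hg1np]
      -- RHS
      simp only [pvSegments, if_neg (by simp : ¬(a :: t4) ++ b :: r2 = []),
        if_neg (by simp only [List.length_append, List.length_cons, ht4len]; omega :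
          ¬((a :: t4) ++ b :: r2).length ≤ 5)]
      rw [PySem.List.slice_to (xs := (a :: t4) ++ b :: r2) (b := 5) (by norm_num),
        PySem.List.slice_from (xs := (a :: t4) ++ b :: r2) (a := 5) (by norm_num),
        show ((5 : Int)).toNat = 5 from by decide, ← hsplit, ht, hd,
        PySem.List.enumerate_cons, PySem.List.enumerate_cons, PySem.List.enumerate_nil]
      simp only [List.foldl_cons, List.foldl_nil, pvStepB]
      rw [PySem.List.pySetD_of_nonneg np _ (by norm_num), PySem.List.pyGetD_zero,
        show ((0 : Int)).toNat = 0 from rfl,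
        show (0 : Int) + 1 = ((1 : Nat) : Int) from by norm_num,
        PySem.List.pySetD_natCast, PySem.List.pyGetD_natCast]
      have hgB : (np.set 0 (np.getD 0 "" ++ PySem.Str.join "" (a :: t4))).getD 1 ""
          = np.getD 1 "" := by
        simp [List.getD_eq_getElem?_getD, List.getElem?_set_ne (by norm_num : (0 : Nat) ≠ 1)]
      rw [hgB, hnp2def, pvJoin_eq_pvCat, pvJoin_eq_pvCat, pvCat_cons, pvCat_cons,
        String.append_assoc, String.append_assoc]

-- B's row merge preserves the number of parts
theorem pvStepB_fold_length (l : List String) :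
    ∀ (s : Int) (np : List String),
      ((PySem.List.enumerate l s).foldl pvStepB np).length = np.length := by
  induction l with
  | nil => intro s np; simp [PySem.List.enumerate]
  | cons a l ih =>
    intro s np
    rw [PySem.List.enumerate_cons, List.foldl_cons, ih]
    simp [pvStepB, PySem.List.length_pySetD]

-- the outer loop over the later rows, x running over k, k+1, … with 1 ≤ k
theorem pvOuter (rest : List (List String)) :
    ∀ (k : Int), 1 ≤ k → ∀ (np : List String),
      (∀ row ∈ rest, (row ≠ [] → 1 ≤ np.length) ∧ (6 ≤ row.length → 2 ≤ np.length)) →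
      (PySem.List.enumerate rest k).foldl
        (fun newPart xrow =>
          ((PySem.List.enumerate xrow.2 0).foldl (pvStepA xrow.1) (newPart, -1)).1) np
      = rest.foldl
          (fun parts row => (PySem.List.enumerate (pvSegments row) 0).foldl pvStepB parts) np := by
  induction rest with
  | nil => intro k _ np _; simp [PySem.List.enumerate]
  | cons row rest ih =>
    intro k hk np hcond
    rw [PySem.List.enumerate_cons, List.foldl_cons, List.foldl_cons]
    have hrow := hcond row (by simp)
    rw [pvRowX k (by omega) row np hrow.1 hrow.2]
    apply ih (k + 1) (by omega)
    intro r hr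
    rw [pvStepB_fold_length]
    exact hcond r (by simp [hr])

-- ===== VERDICT (by name: the statement is the Claim_ definition above) =====
theorem convoluteParts_spec : Claim_equal_convoluteParts := by
  intro labels _ hpre
  unfold Spec_convoluteParts
  match labels with
  | [] => simp [convoluteParts, convoluteParts_alt, PySem.List.enumerate]
  | r0 :: rest =>
    simp only [convoluteParts, convoluteParts_alt]
    rw [PySem.List.enumerate_cons, List.foldl_cons,
      show (((0 : Int), r0)).2 = r0 from rfl, show (((0 : Int), r0)).1 = (0 : Int) from rfl,
      pvRow0]
    apply pvOuter rest 1 (by omega)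
    intro row hrow
    have h := hpre row (by simpa using hrow)
    constructor
    · intro hner
      have hr0 : r0 ≠ [] := by simpa using h.1 hner
      rw [pvSegments, if_neg hr0]
      split <;> simp
    · intro h6
      have hr0 : 6 ≤ r0.length := by simpa using h.2 h6
      have hne : r0 ≠ [] := by rintro rfl; simp at hr0
      rw [pvSegments, if_neg hne, if_neg (by omega)]
      simp
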